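-- pv_equiv track=rewrite | github.com/RichardLiu2001/Coding-Interview-Prep | Company/Twitter/Weird Faculty.py | exam
-- ===== SOURCE A (Python) =====
-- def exam(verdicts):
--
-- 	total_sum = 0
--
-- 	for score in verdicts:
-- 		if score == 0:
-- 			total_sum -= 1
-- 		else:
-- 			total_sum += 1
--
--
-- 	current_sum = 0
--
-- 	for i, score in enumerate(verdicts):
-- 		if current_sum > total_sum:
-- 			return i
--
--
-- 		score_contribution = 1
--
-- 		if score == 0:
-- 			score_contribution = -1
--
-- 		current_sum += score_contribution
-- 		total_sum -= score_contribution
--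
--
-- 	return len(verdicts)
-- ===== SOURCE B (Python) =====
-- def exam(verdicts):
--     n = len(verdicts)
--     zeros = [i for i, v in enumerate(verdicts) if v == 0]
--     K = (n - 2 * len(zeros)) // 2 + 1
--     lo = 0
--     j = 0
--     for q in zeros:
--         cand = max(lo, K + 2 * j)
--         if cand <= min(q, n - 1):
--             return cand
--         lo = q + 1
--         j += 1
--     cand = max(lo, K + 2 * j)
--     if cand <= n - 1:
--         return cand
--     return n
-- ===== Notes on version B (the rewrite author's own statement) =====
-- stated objective: alternative
-- what changed: B does not scan elements with running left/right sums: it collects the positions of the zero verdicts, computes the crossing threshold K = total//2 + 1 once, and then loops over the zero positions only, using the closed form that between consecutive zeros the prefix sum grows by 1 per index, so the first qualifying index in each block is max(lo, K + 2*j) directly.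
import Mathlib
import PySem

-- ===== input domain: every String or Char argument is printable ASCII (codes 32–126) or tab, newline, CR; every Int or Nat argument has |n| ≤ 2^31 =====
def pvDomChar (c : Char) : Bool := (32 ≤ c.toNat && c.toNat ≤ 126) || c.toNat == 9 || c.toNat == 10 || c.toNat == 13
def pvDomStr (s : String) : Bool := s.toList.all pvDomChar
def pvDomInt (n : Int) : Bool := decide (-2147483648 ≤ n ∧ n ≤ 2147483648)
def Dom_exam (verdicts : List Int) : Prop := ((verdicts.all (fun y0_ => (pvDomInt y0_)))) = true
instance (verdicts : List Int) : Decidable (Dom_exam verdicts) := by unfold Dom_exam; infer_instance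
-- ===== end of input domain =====

-- B replaces A's per-element scan with a search over the zero positions using a
-- closed-form candidate index per block (objective: alternative algorithm); the file
-- proves the two agree on all inputs.

-- ===== PORT A =====
-- first loop of A: total_sum over all verdicts
def examTotal : List Int → Int → Int
  | [], t => t
  | s :: rest, t => examTotal rest (if s == 0 then t - 1 else t + 1)

-- second loop of A: enumerate with current_sum / total_sum, early return = some i
def examLoop : List Int → Int → Int → Int → Option Int
  | [], _, _, _ => none
  | s :: rest, i, c, t =>
    if c > t then some i
    else
      let sc : Int := if s == 0 then -1 else 1
      examLoop rest (i + 1) (c + sc) (t - sc)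

def exam (verdicts : List Int) : Int :=
  (examLoop verdicts 0 0 (examTotal verdicts 0)).getD (verdicts.length : Int)

-- ===== PORT B =====
-- [i for i, v in enumerate(verdicts) if v == 0]
def examAltZeros : List Int → Nat → List Nat
  | [], _ => []
  | v :: r, i => if v == 0 then i :: examAltZeros r (i + 1) else examAltZeros r (i + 1)

-- the 'for q in zeros' loop with state lo, j, plus the trailing block after the loop
def examAltGo (K n : Int) : List Nat → Int → Int → Option Int
  | [], lo, j =>
    let cand := max lo (K + 2 * j)
    if cand ≤ n - 1 then some cand else none
  | q :: rest, lo, j =>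
    let cand := max lo (K + 2 * j)
    if cand ≤ min (q : Int) (n - 1) then some cand
    else examAltGo K n rest ((q : Int) + 1) (j + 1)

def exam_alt (verdicts : List Int) : Int :=
  let n : Int := verdicts.length
  let zeros := examAltZeros verdicts 0
  let K : Int := PySem.Int.floordiv (n - 2 * (zeros.length : Int)) 2 + 1
  (examAltGo K n zeros 0 0).getD n

-- ===== PRECONDITION & SPEC =====
def Spec_exam (verdicts : List Int) (out : Int) : Prop := out = exam_alt verdicts
instance (verdicts : List Int) (out : Int) : Decidable (Spec_exam verdicts out) := by unfold Spec_exam; infer_instance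

-- ===== CLAIM (what is proved, stated in full; the proofs are below) =====
def Claim_equal_exam : Prop := ∀ (verdicts : List Int), Dom_exam verdicts → Spec_exam verdicts (exam verdicts)

-- ===== LEMMAS AND PROOFS =====
def pvContrib (v : Int) : Int := if v == 0 then -1 else 1

def pvCsum (l : List Int) : Int := (l.map pvContrib).sum

def pvPref (l : List Int) (k : Nat) : Int := pvCsum (l.take k)

theorem pvCsum_cons (v : Int) (r : List Int) : pvCsum (v :: r) = pvContrib v + pvCsum r := by
  simp [pvCsum]

theorem examTotal_eq (l : List Int) (t : Int) : examTotal l t = t + pvCsum l := by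
  induction l generalizing t with
  | nil => simp [examTotal, pvCsum]
  | cons v r ih =>
    rw [examTotal, ih, pvCsum_cons, pvContrib]
    by_cases h : v == 0 <;> simp [h] <;> ring

-- generic: find? only depends on the predicate on members
theorem pvFind?_congr_mem {α : Type} (l : List α) (p q : α → Bool)
    (h : ∀ a ∈ l, p a = q a) : l.find? p = l.find? q := by
  induction l with
  | nil => rfl
  | cons a r ih =>
    have ha := h a (by simp)
    simp only [List.find?_cons, ha]
    cases hq : q a with
    | true => rfl
    | false => exact ih (fun b hb => h b (by simp [hb]))

theorem pvFind?_range_none (N : Nat) (p : Nat → Bool)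
    (h : ∀ k, k < N → p k = false) : (List.range N).find? p = none := by
  rw [List.find?_eq_none]
  intro k hk
  simp [h k (List.mem_range.mp hk)]

theorem pvFind?_range_some (N k : Nat) (p : Nat → Bool)
    (hk : k < N) (hp : p k = true) (hmin : ∀ m, m < k → p m = false) :
    (List.range N).find? p = some k := by
  induction N with
  | zero => omega
  | succ n ih =>
    rw [List.range_succ, List.find?_append]
    by_cases h : k < n
    · rw [ih h]; rfl
    · have hkn : k = n := by omega
      rw [pvFind?_range_none n p (fun m hm => hmin m (by omega))]
      subst hkn
      simp [hp]

-- A's loop = first index in range where the doubled prefix beats the conserved total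
theorem examLoop_eq (l : List Int) (i c t : Int) :
    examLoop l i c t
      = ((List.range l.length).find?
          (fun k => decide (2 * (c + pvPref l k) > c + t))).map (fun k => i + (k : Int)) := by
  induction l generalizing i c t with
  | nil => rfl
  | cons v r ih =>
    rw [examLoop]
    have hlen : (v :: r).length = r.length + 1 := rfl
    rw [hlen, List.range_succ_eq_map, List.find?_cons]
    have h0 : pvPref (v :: r) 0 = 0 := rfl
    by_cases h : c > t
    · have : (decide (2 * (c + pvPref (v :: r) 0) > c + t)) = true := by
        rw [h0]; simp; omega
      rw [this]
      simp [h]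
    · have hd : (decide (2 * (c + pvPref (v :: r) 0) > c + t)) = false := by
        rw [h0]; simp; omega
      rw [hd, if_neg h]
      show examLoop r (i + 1) (c + pvContrib v) (t - pvContrib v) = _
      rw [List.find?_map, ih]
      have hpred : ((fun k => decide (2 * (c + pvPref (v :: r) k) > c + t)) ∘ Nat.succ)
          = fun k => decide (2 * ((c + pvContrib v) + pvPref r k) > (c + pvContrib v) + (t - pvContrib v)) := by
        funext k
        have hps : pvPref (v :: r) (k + 1) = pvContrib v + pvPref r k := by
          simp [pvPref, List.take_succ_cons, pvCsum_cons]
        simp only [Function.comp, Nat.succ_eq_add_one, hps, decide_eq_decide]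
        omega
      rw [hpred]
      cases hfo : (List.range r.length).find?
          (fun k => decide (2 * ((c + pvContrib v) + pvPref r k) > (c + pvContrib v) + (t - pvContrib v))) with
      | none => simp
      | some k =>
        simp
        omega

-- zeros list: membership bounds and sortedness
theorem zeros_mem (l : List Int) : ∀ (s q : Nat), q ∈ examAltZeros l s → s ≤ q ∧ q < s + l.length := by
  induction l with
  | nil => intro s q h; simp [examAltZeros] at h
  | cons v r ih =>
    intro s q h
    rw [examAltZeros] at h
    by_cases hv : v == 0
    · rw [if_pos hv] at h
      rcases List.mem_cons.mp h with h | h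
      · subst h; simp
      · have := ih (s + 1) q h; constructor <;> [omega; (simp; omega)]
    · rw [if_neg hv] at h
      have := ih (s + 1) q h; constructor <;> [omega; (simp; omega)]

theorem zeros_sorted (l : List Int) : ∀ s, (examAltZeros l s).Pairwise (· < ·) := by
  induction l with
  | nil => intro s; simp [examAltZeros]
  | cons v r ih =>
    intro s
    rw [examAltZeros]
    by_cases hv : v == 0
    · rw [if_pos hv]
      refine List.Pairwise.cons ?_ (ih (s + 1))
      intro q hq
      have := zeros_mem r (s + 1) q hq
      omega
    · rw [if_neg hv]; exact ih (s + 1)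

-- prefix sum in terms of the zeros seen so far
theorem pvPref_eq (l : List Int) : ∀ (s k : Nat), k ≤ l.length →
    pvPref l k = (k : Int) - 2 * (((examAltZeros l s).countP (fun q => decide (q < s + k)) : Nat) : Int) := by
  induction l with
  | nil =>
    intro s k hk
    have : k = 0 := by simpa using hk
    subst this; rfl
  | cons v r ih =>
    intro s k hk
    cases k with
    | zero =>
      have hc : (examAltZeros (v :: r) s).countP (fun q => decide (q < s + 0)) = 0 := by
        rw [List.countP_eq_zero]
        intro q hq
        have := zeros_mem (v :: r) s q hq
        simp; omega
      rw [hc]; rfl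
    | succ k =>
      have hk' : k ≤ r.length := by simpa using hk
      have hstep : pvPref (v :: r) (k + 1) = pvContrib v + pvPref r k := by
        simp [pvPref, List.take_succ_cons, pvCsum_cons]
      have hshift : s + (k + 1) = (s + 1) + k := by omega
      rw [hstep, examAltZeros, hshift]
      by_cases hv : v == 0
      · rw [if_pos hv]
        rw [List.countP_cons, if_pos (by simp; omega)]
        rw [ih (s + 1) k hk']
        have : pvContrib v = -1 := by simp [pvContrib, hv]
        rw [this]
        push_cast
        ring
      · rw [if_neg hv]
        rw [ih (s + 1) k hk']
        have : pvContrib v = 1 := by simp [pvContrib, hv]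
        rw [this]
        push_cast
        ring

theorem pvCsum_total (l : List Int) :
    pvCsum l = (l.length : Int) - 2 * ((examAltZeros l 0).length : Int) := by
  have h := pvPref_eq l 0 l.length le_rfl
  have ht : pvPref l l.length = pvCsum l := by simp [pvPref]
  have hc : (examAltZeros l 0).countP (fun q => decide (q < 0 + l.length)) = (examAltZeros l 0).length := by
    rw [List.countP_eq_length]
    intro q hq
    have := zeros_mem l 0 q hq
    simp; omega
  rw [ht, hc] at h
  exact h

-- strict comparison against the total ↔ reaching the threshold K = total//2 + 1
theorem pvK_iff (T p : Int) :
    (2 * p > T) ↔ (PySem.Int.floordiv T 2 + 1 ≤ p) := by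
  have h1 := PySem.Int.floordiv_mul_add_mod T 2
  have h2 := PySem.Int.mod_nonneg T (b := 2) (by omega)
  have h3 := PySem.Int.mod_lt T (b := 2) (by omega)
  omega

-- countP of a split zeros list at a point between the two parts
theorem pvCount_block (con zs : List Nat) (m : Nat)
    (h1 : ∀ q ∈ con, q < m) (h2 : ∀ q ∈ zs, m ≤ q) :
    (con ++ zs).countP (fun q => decide (q < m)) = con.length := by
  rw [List.countP_append,
    List.countP_eq_length.mpr (by intro q hq; simpa using h1 q hq),
    List.countP_eq_zero.mpr (by intro q hq; simpa using Nat.not_lt.mpr (h2 q hq))]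
  omega

-- B's block search = first index in range reaching the threshold
theorem examAltGo_eq (N : Nat) (K : Int) (Z : List Nat) :
    ∀ (zs con : List Nat) (lo : Nat),
      Z = con ++ zs →
      (∀ q ∈ con, q < lo) →
      (∀ q ∈ zs, lo ≤ q) →
      zs.Pairwise (· < ·) →
      (∀ q ∈ zs, q < N) →
      (∀ m : Nat, m < lo → ¬ (K ≤ (m : Int) - 2 * ((Z.countP (fun q => decide (q < m)) : Nat) : Int))) →
      examAltGo K (N : Int) zs (lo : Int) ((con.length : Nat) : Int)
        = ((List.range N).find?
            (fun (k : Nat) => decide (K ≤ (k : Int) - 2 * ((Z.countP (fun q => decide (q < k)) : Nat) : Int)))).map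
            (fun (k : Nat) => (k : Int)) := by
  intro zs
  induction zs with
  | nil =>
    intro con lo hZ hcon _ _ _ hprev
    have hZ' : Z = con := by simpa using hZ
    rw [examAltGo]
    by_cases hc : max (lo : Int) (K + 2 * (con.length : Int)) ≤ (N : Int) - 1
    · rw [if_pos hc]
      have h0 : (0 : Int) ≤ max (lo : Int) (K + 2 * (con.length : Int)) := le_trans (by positivity) (le_max_left _ _)
      set cand : Int := max (lo : Int) (K + 2 * (con.length : Int)) with hcand
      have hcN : ((cand.toNat : Nat) : Int) = cand := Int.toNat_of_nonneg h0
      have hcount : ∀ m : Nat, lo ≤ m → Z.countP (fun q => decide (q < m)) = con.length := by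
        intro m hm
        rw [hZ']
        have := pvCount_block con [] m (fun q hq => by have := hcon q hq; omega) (by simp)
        simpa using this
      rw [pvFind?_range_some N cand.toNat _ (by omega)
        (by
          simp only [decide_eq_true_eq]
          rw [hcount cand.toNat (by omega)]
          omega)
        (by
          intro m hm
          simp only [decide_eq_false_iff_not]
          by_cases hml : m < lo
          · exact hprev m hml
          · rw [hcount m (by omega)]
            omega)]
      simp [hcN]
    · rw [if_neg hc]
      have hn := pvFind?_range_none N
        (fun (k : Nat) => decide (K ≤ (k : Int) - 2 * ((Z.countP (fun q => decide (q < k)) : Nat) : Int)))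
        (by
          intro k hk
          simp only [decide_eq_false_iff_not]
          by_cases hkl : k < lo
          · exact hprev k hkl
          · rw [hZ']
            have := pvCount_block con [] k (fun q hq => by have := hcon q hq; omega) (by simp)
            rw [show con ++ ([] : List Nat) = con from by simp] at this
            rw [this]
            omega)
      rw [hn]
      rfl
  | cons q rest ih =>
    intro con lo hZ hcon hge hsort hlt hprev
    have hqN : q < N := hlt q (by simp)
    have hloq : lo ≤ q := hge q (by simp)
    have hrest_gt : ∀ q' ∈ rest, q < q' := by
      intro q' hq'
      exact (List.pairwise_cons.mp hsort).1 q' hq'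
    rw [examAltGo]
    have hmin : min ((q : Nat) : Int) ((N : Int) - 1) = (q : Int) := by omega
    rw [hmin]
    by_cases hc : max (lo : Int) (K + 2 * (con.length : Int)) ≤ (q : Int)
    · rw [if_pos hc]
      have h0 : (0 : Int) ≤ max (lo : Int) (K + 2 * (con.length : Int)) := le_trans (by positivity) (le_max_left _ _)
      set cand : Int := max (lo : Int) (K + 2 * (con.length : Int)) with hcand
      have hcN : ((cand.toNat : Nat) : Int) = cand := Int.toNat_of_nonneg h0
      have hcount : ∀ m : Nat, lo ≤ m → m ≤ q → Z.countP (fun q => decide (q < m)) = con.length := by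
        intro m hm hmq
        rw [hZ]
        exact pvCount_block con (q :: rest) m
          (fun q' hq' => by have := hcon q' hq'; omega)
          (by
            intro q' hq'
            rcases List.mem_cons.mp hq' with h | h
            · omega
            · have := hrest_gt q' h; omega)
      rw [pvFind?_range_some N cand.toNat _ (by omega)
        (by
          simp only [decide_eq_true_eq]
          rw [hcount cand.toNat (by omega) (by omega)]
          omega)
        (by
          intro m hm
          simp only [decide_eq_false_iff_not]
          by_cases hml : m < lo
          · exact hprev m hml
          · rw [hcount m (by omega) (by omega)]
            omega)]
      simp [hcN]
    · rw [if_neg hc]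
      have hcount : ∀ m : Nat, lo ≤ m → m ≤ q → Z.countP (fun q => decide (q < m)) = con.length := by
        intro m hm hmq
        rw [hZ]
        exact pvCount_block con (q :: rest) m
          (fun q' hq' => by have := hcon q' hq'; omega)
          (by
            intro q' hq'
            rcases List.mem_cons.mp hq' with h | h
            · omega
            · have := hrest_gt q' h; omega)
      have hrec := ih (con ++ [q]) (q + 1)
        (by rw [hZ]; simp)
        (by
          intro q' hq'
          rcases List.mem_append.mp hq' with h | h
          · have := hcon q' h; omega
          · simp at h; omega)
        (fun q' hq' => by have := hrest_gt q' hq'; omega)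
        ((List.pairwise_cons.mp hsort).2)
        (fun q' hq' => hlt q' (by simp [hq']))
        (by
          intro m hm
          by_cases hml : m < lo
          · exact hprev m hml
          · rw [hcount m (by omega) (by omega)]
            omega)
      have hlen : (((con ++ [q]).length : Nat) : Int) = (con.length : Int) + 1 := by simp
      have hlo : (((q + 1 : Nat) : Nat) : Int) = ((q : Nat) : Int) + 1 := by push_cast; ring
      rw [hlen, hlo] at hrec
      exact hrec

theorem exam_spec_main (l : List Int) : exam l = exam_alt l := by
  have hT : examTotal l 0 = pvCsum l := by rw [examTotal_eq]; ring
  have hz : ∀ q ∈ examAltZeros l 0, q < l.length := by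
    intro q hq
    have := zeros_mem l 0 q hq
    omega
  have hgo := examAltGo_eq l.length
    (PySem.Int.floordiv ((l.length : Int) - 2 * ((examAltZeros l 0).length : Int)) 2 + 1)
    (examAltZeros l 0) (examAltZeros l 0) [] 0
    (by simp) (by simp) (by simp) (zeros_sorted l 0) hz (by omega)
  have hfind : (List.range l.length).find?
        (fun k => decide (2 * ((0 : Int) + pvPref l k) > (0 : Int) + (pvCsum l)))
      = (List.range l.length).find?
        (fun (k : Nat) => decide (PySem.Int.floordiv ((l.length : Int) - 2 * ((examAltZeros l 0).length : Int)) 2 + 1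
            ≤ (k : Int) - 2 * (((examAltZeros l 0).countP (fun q => decide (q < k)) : Nat) : Int))) := by
    apply pvFind?_congr_mem
    intro k hk
    have hkN : k ≤ l.length := le_of_lt (List.mem_range.mp hk)
    have hp := pvPref_eq l 0 k hkN
    rw [show (0 : Nat) + k = k from by omega] at hp
    rw [decide_eq_decide]
    rw [hp, pvCsum_total l]
    have := pvK_iff ((l.length : Int) - 2 * ((examAltZeros l 0).length : Int))
      ((k : Int) - 2 * (((examAltZeros l 0).countP (fun q => decide (q < k)) : Nat) : Int))
    omega
  show (examLoop l 0 0 (examTotal l 0)).getD (l.length : Int) = _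
  rw [hT, examLoop_eq]
  unfold exam_alt
  simp only []
  rw [show (((0 : Nat) : Int)) = (0 : Int) from rfl] at hgo
  rw [show ((([] : List Nat).length : Nat) : Int) = (0 : Int) from rfl] at hgo
  rw [hgo, ← hfind]
  cases hfo : (List.range l.length).find? (fun k => decide (2 * ((0 : Int) + pvPref l k) > (0 : Int) + pvCsum l)) with
  | none => simp
  | some k => simp

-- ===== VERDICT (by name: the statement is the Claim_ definition above) =====
theorem exam_spec : Claim_equal_exam := by
  intro verdicts _
  unfold Spec_exam
  exact exam_spec_main verdicts
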